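-- pv_equiv track=rewrite | github.com/krishpinninti789/april-dsa | MaxOnes3.py | maxOnes
-- ===== SOURCE A (Python) =====
-- def maxOnes(arr, k):
--     # code here
--     left = 0
--     maxans = 0
--     zc=0
--     for right in range(len(arr)):
--         if arr[right]==0:
--             zc+=1
--         if zc>k:
--             if arr[left]==0:
--                 zc-=1
--             left+=1
--
--     return len(arr)-left
-- ===== SOURCE B (Python) =====
-- def maxOnes(arr, k):
--     left = 0
--     zc = 0
--     best = 0
--     for right in range(len(arr)):
--         if arr[right] == 0:
--             zc += 1
--         while zc > k and left <= right:
--             if arr[left] == 0: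
--                 zc -= 1
--             left += 1
--         best = max(best, right - left + 1)
--     return best
-- ===== Notes on version B (the rewrite author's own statement) =====
-- stated objective: alternative
-- what changed: replaces A's grow-only window (which never shrinks and reads the answer off as len(arr)-left) with an explicit shrink-to-valid inner while loop that restores the zero budget and maintains a running best window size
import Mathlib
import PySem

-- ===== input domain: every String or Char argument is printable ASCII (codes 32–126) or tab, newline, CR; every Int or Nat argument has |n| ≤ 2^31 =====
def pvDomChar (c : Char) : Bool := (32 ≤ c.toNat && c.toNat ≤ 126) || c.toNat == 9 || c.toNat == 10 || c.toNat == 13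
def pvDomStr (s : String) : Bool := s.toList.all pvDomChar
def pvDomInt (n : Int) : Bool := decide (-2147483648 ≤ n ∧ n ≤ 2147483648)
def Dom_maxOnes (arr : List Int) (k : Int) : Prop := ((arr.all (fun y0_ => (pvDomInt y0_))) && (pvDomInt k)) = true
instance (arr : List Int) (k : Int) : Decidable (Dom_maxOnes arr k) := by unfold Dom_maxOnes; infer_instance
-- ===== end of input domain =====

-- B replaces A's grow-only window (answer read off as len(arr)-left) with the explicit
-- shrink-to-valid two-pointer window maintaining a running best; same cost, different decomposition.

-- ===== PORT A =====
-- A's local 'maxans' is initialized to 0 and never read or returned; it is omitted from the state.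
-- Indices 'right' (∈ range(len(arr))) and 'left' (0 ≤ left ≤ right, proved below) are always in
-- range, so arr[right]/arr[left] are ported with pyGetD (exact there).
def stepA (arr : List Int) (k : Int) (st : Int × Int) (right : Int) : Int × Int :=
  let left := st.1
  let zc := st.2
  let zc := if PySem.List.pyGetD arr right 0 = 0 then zc + 1 else zc
  if zc > k then
    let zc := if PySem.List.pyGetD arr left 0 = 0 then zc - 1 else zc
    (left + 1, zc)
  else (left, zc)

def maxOnes (arr : List Int) (k : Int) : Int :=
  let n : Int := arr.length
  let st := (PySem.List.pyRange 0 n 1).foldl (stepA arr k) (0, 0)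
  n - st.1

-- ===== PORT B =====
-- the inner 'while zc > k and left <= right' loop of Source B
def altShrink (arr : List Int) (k right left zc : Int) : Int × Int :=
  if h : zc > k ∧ left ≤ right then
    altShrink arr k right (left + 1) (if PySem.List.pyGetD arr left 0 = 0 then zc - 1 else zc)
  else (left, zc)
termination_by (right + 1 - left).toNat
decreasing_by omega

def stepB (arr : List Int) (k : Int) (st : Int × Int × Int) (right : Int) : Int × Int × Int :=
  let left := st.1
  let zc := st.2.1
  let best := st.2.2
  let zc := if PySem.List.pyGetD arr right 0 = 0 then zc + 1 else zc
  let p := altShrink arr k right left zc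
  (p.1, p.2, max best (right - p.1 + 1))

def maxOnes_alt (arr : List Int) (k : Int) : Int :=
  let n : Int := arr.length
  let st := (PySem.List.pyRange 0 n 1).foldl (stepB arr k) (0, 0, 0)
  st.2.2

-- ===== PRECONDITION & SPEC =====
def Spec_maxOnes (arr : List Int) (k : Int) (out : Int) : Prop := out = maxOnes_alt arr k
instance (arr : List Int) (k : Int) (out : Int) : Decidable (Spec_maxOnes arr k out) := by unfold Spec_maxOnes; infer_instance

-- ===== CLAIM (what is proved, stated in full; the proofs are below) =====
def Claim_equal_maxOnes : Prop := ∀ (arr : List Int) (k : Int), Dom_maxOnes arr k → Spec_maxOnes arr k (maxOnes arr k)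

-- ===== LEMMAS AND PROOFS =====

-- number of zeros of arr in index window [l, r)
def pvZc (arr : List Int) (l r : Nat) : Int :=
  (((arr.drop l).take (r - l)).countP (fun x => x = 0) : Int)

lemma pvZc_self (arr : List Int) (l : Nat) : pvZc arr l l = 0 := by
  simp [pvZc]

lemma pvZc_succ_right (arr : List Int) (l r : Nat) (hlr : l ≤ r) (hr : r < arr.length) :
    pvZc arr l (r + 1) = pvZc arr l r + (if arr.getD r 0 = 0 then 1 else 0) := by
  unfold pvZc
  have h1 : r + 1 - l = (r - l) + 1 := by omega
  have h2 : (arr.drop l)[r - l]? = some arr[r] := by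
    rw [List.getElem?_drop]
    have : l + (r - l) = r := by omega
    rw [this, List.getElem?_eq_getElem hr]
  rw [h1, List.take_add_one, List.countP_append, h2]
  have h3 : arr.getD r 0 = arr[r] := by
    rw [List.getD_eq_getElem?_getD, List.getElem?_eq_getElem hr]; rfl
  rw [h3]
  simp [List.countP_cons]

lemma pvZc_succ_left (arr : List Int) (l r : Nat) (hlr : l < r) (hl : l < arr.length) :
    pvZc arr (l + 1) r = pvZc arr l r - (if arr.getD l 0 = 0 then 1 else 0) := by
  unfold pvZc
  have h1 : arr.drop l = arr[l] :: arr.drop (l + 1) := List.drop_eq_getElem_cons hl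
  have h2 : r - l = (r - (l + 1)) + 1 := by omega
  rw [h1, h2, List.take_succ_cons, List.countP_cons]
  have h3 : arr.getD l 0 = arr[l] := by
    rw [List.getD_eq_getElem?_getD, List.getElem?_eq_getElem hl]; rfl
  rw [h3]
  split <;> simp_all

lemma pvZc_succ_le (arr : List Int) (l r : Nat) : pvZc arr (l + 1) r ≤ pvZc arr l r := by
  by_cases hl : l < arr.length
  · by_cases hlr : l < r
    · rw [pvZc_succ_left arr l r hlr hl]
      split <;> omega
    · have h1 : r - l = 0 := by omega
      have h2 : r - (l + 1) = 0 := by omega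
      unfold pvZc
      rw [h1, h2]
      simp
  · have h1 : arr.drop l = [] := List.drop_eq_nil_of_le (by omega)
    have h2 : arr.drop (l + 1) = [] := List.drop_eq_nil_of_le (by omega)
    unfold pvZc
    rw [h1, h2]
    simp

lemma pvZc_anti (arr : List Int) (l l' r : Nat) (h : l ≤ l') : pvZc arr l' r ≤ pvZc arr l r := by
  induction l', h using Nat.le_induction with
  | base => exact le_refl _
  | succ m hm ih => exact le_trans (pvZc_succ_le arr m r) ih

lemma pvZc_mono_right (arr : List Int) (l r : Nat) (hlr : l ≤ r) (hr : r < arr.length) :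
    pvZc arr l r ≤ pvZc arr l (r + 1) := by
  rw [pvZc_succ_right arr l r hlr hr]
  split <;> omega

-- specification of the inner while loop of B
lemma altShrink_spec (arr : List Int) (k : Int) (m : Nat) (hm : m < arr.length) :
    ∀ l0 : Nat, l0 ≤ m + 1 →
    ∃ l' : Nat, altShrink arr k (m : Int) (l0 : Int) (pvZc arr l0 (m + 1)) = ((l' : Int), pvZc arr l' (m + 1)) ∧
      l0 ≤ l' ∧ l' ≤ m + 1 ∧ (pvZc arr l' (m + 1) ≤ k ∨ l' = m + 1) ∧
      (l' = l0 ∨ pvZc arr (l' - 1) (m + 1) > k) := by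
  have key : ∀ fuel l0, l0 ≤ m + 1 → m + 1 - l0 ≤ fuel →
      ∃ l' : Nat, altShrink arr k (m : Int) (l0 : Int) (pvZc arr l0 (m + 1)) = ((l' : Int), pvZc arr l' (m + 1)) ∧
        l0 ≤ l' ∧ l' ≤ m + 1 ∧ (pvZc arr l' (m + 1) ≤ k ∨ l' = m + 1) ∧
        (l' = l0 ∨ pvZc arr (l' - 1) (m + 1) > k) := by
    intro fuel
    induction fuel with
    | zero =>
      intro l0 hl0 hf
      have hl0e : l0 = m + 1 := by omega
      refine ⟨l0, ?_, le_refl _, hl0, Or.inr hl0e, Or.inl rfl⟩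
      rw [altShrink, dif_neg]
      intro hcon
      have := hcon.2
      omega
    | succ f ih =>
      intro l0 hl0 hf
      by_cases hc : pvZc arr l0 (m + 1) > k ∧ (l0 : Int) ≤ (m : Int)
      · have hl0m : l0 ≤ m := by
          have := hc.2; omega
        have hz : (if PySem.List.pyGetD arr (l0 : Int) 0 = 0 then pvZc arr l0 (m + 1) - 1 else pvZc arr l0 (m + 1)) = pvZc arr (l0 + 1) (m + 1) := by
          rw [PySem.List.pyGetD_natCast, pvZc_succ_left arr l0 (m + 1) (by omega) (by omega)]
          split_ifs <;> ring
        obtain ⟨l', heq, h1, h2, h3, h4⟩ := ih (l0 + 1) (by omega) (by omega)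
        refine ⟨l', ?_, by omega, h2, h3, ?_⟩
        · rw [altShrink, dif_pos hc, hz]
          have hcast : ((l0 : Int) + 1) = ((l0 + 1 : Nat) : Int) := by push_cast; ring
          rw [hcast]
          exact heq
        · rcases h4 with h | h
          · right
            rw [h]
            simpa using hc.1
          · right; exact h
      · refine ⟨l0, ?_, le_refl _, hl0, ?_, Or.inl rfl⟩
        · rw [altShrink, dif_neg hc]
        · rcases not_and_or.mp hc with h | h
          · left; omega
          · right
            have : ¬((l0 : Int) ≤ (m : Int)) := h
            omega
  intro l0 hl0
  exact key (m + 1 - l0) l0 hl0 (le_refl _)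

-- the joint invariant after processing the first m elements
def pvInv (arr : List Int) (k : Int) (m : Nat) (A : Int × Int) (B : Int × Int × Int) : Prop :=
  ∃ Ln ln : Nat, A.1 = (Ln : Int) ∧ B.1 = (ln : Int) ∧ Ln ≤ ln ∧ ln ≤ m ∧
    A.2 = pvZc arr Ln m ∧ B.2.1 = pvZc arr ln m ∧
    (pvZc arr ln m ≤ k ∨ ln = m) ∧ (ln = 0 ∨ pvZc arr (ln - 1) m > k) ∧
    B.2.2 = (m : Int) - (Ln : Int)

lemma pvInv_step (arr : List Int) (k : Int) (m : Nat) (hm : m < arr.length)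
    (A : Int × Int) (B : Int × Int × Int) (h : pvInv arr k m A B) :
    pvInv arr k (m + 1) (stepA arr k A (m : Int)) (stepB arr k B (m : Int)) := by
  obtain ⟨Ln, ln, hA1, hB1, hLl, hlm, hA2, hB2, hvalid, hmin, hbest⟩ := h
  have hZA : (if PySem.List.pyGetD arr (m : Int) 0 = 0 then A.2 + 1 else A.2) = pvZc arr Ln (m + 1) := by
    rw [PySem.List.pyGetD_natCast, hA2, pvZc_succ_right arr Ln m (by omega) hm]
    split_ifs <;> ring
  have hZB : (if PySem.List.pyGetD arr (m : Int) 0 = 0 then B.2.1 + 1 else B.2.1) = pvZc arr ln (m + 1) := by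
    rw [PySem.List.pyGetD_natCast, hB2, pvZc_succ_right arr ln m hlm hm]
    split_ifs <;> ring
  obtain ⟨l', heq, hll', hl'm1, hvalid', hmin'⟩ := altShrink_spec arr k m hm ln (by omega)
  have hstepB : stepB arr k B (m : Int) = ((l' : Int), pvZc arr l' (m + 1), max ((m : Int) - (Ln : Int)) ((m : Int) - (l' : Int) + 1)) := by
    simp only [stepB]
    rw [hZB, hB1, heq, hbest]
  have hminNew : l' = 0 ∨ pvZc arr (l' - 1) (m + 1) > k := by
    rcases hmin' with h | h
    · subst h
      rcases hmin with h0 | hzk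
      · left; exact h0
      · right
        have h2 := pvZc_mono_right arr (l' - 1) m (by omega) hm
        omega
    · right; exact h
  by_cases hA : pvZc arr Ln (m + 1) > k
  · -- A slides its window
    have hstepA : stepA arr k A (m : Int) = (((Ln + 1 : Nat) : Int), pvZc arr (Ln + 1) (m + 1)) := by
      simp only [stepA]
      rw [hZA, if_pos hA, hA1, PySem.List.pyGetD_natCast,
        pvZc_succ_left arr Ln (m + 1) (by omega) (by omega)]
      simp only [Prod.mk.injEq]
      constructor
      · push_cast; ring
      · split_ifs <;> ring
    have hLl' : Ln + 1 ≤ l' := by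
      by_contra hcon
      have h1 : l' ≤ Ln := by omega
      rcases hvalid' with hv | hv
      · have := pvZc_anti arr l' Ln (m + 1) h1
        omega
      · omega
    rw [hstepA, hstepB]
    refine ⟨Ln + 1, l', rfl, rfl, hLl', hl'm1, rfl, rfl, hvalid', hminNew, ?_⟩
    rw [max_eq_left (by omega : ((m : Int) - (l' : Int) + 1) ≤ (m : Int) - (Ln : Int))]
    push_cast; ring
  · -- A grows its window; B's left pointer coincides with A's
    have hstepA : stepA arr k A (m : Int) = ((Ln : Int), pvZc arr Ln (m + 1)) := by
      simp only [stepA]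
      rw [hZA, if_neg hA, hA1]
    have hl'Ln : l' = Ln := by
      by_contra hne
      have h1 : Ln < l' := lt_of_le_of_ne (le_trans hLl hll') (Ne.symm hne)
      rcases hminNew with h0 | hzk
      · omega
      · have h3 := pvZc_anti arr Ln (l' - 1) (m + 1) (by omega)
        omega
    rw [hstepA, hstepB, hl'Ln]
    refine ⟨Ln, Ln, rfl, rfl, le_refl _, by omega, rfl, rfl, ?_, ?_, ?_⟩
    · rw [← hl'Ln]; exact hvalid'
    · rw [← hl'Ln]; exact hminNew
    · rw [max_eq_right (by omega : ((m : Int) - (Ln : Int)) ≤ (m : Int) - (Ln : Int) + 1)]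
      push_cast; ring

lemma pvInv_fold (arr : List Int) (k : Int) (m : Nat) (hm : m ≤ arr.length) :
    pvInv arr k m ((List.range m).foldl (fun st (j : Nat) => stepA arr k st (j : Int)) (0, 0))
      ((List.range m).foldl (fun st (j : Nat) => stepB arr k st (j : Int)) (0, 0, 0)) := by
  induction m with
  | zero =>
    refine ⟨0, 0, by simp, by simp, le_refl _, le_refl _, by simp [pvZc_self], by simp [pvZc_self], Or.inr rfl, Or.inl rfl, by simp⟩
  | succ m ih =>
    rw [List.range_succ, List.foldl_append, List.foldl_append]
    simp only [List.foldl_cons, List.foldl_nil]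
    exact pvInv_step arr k m (by omega) _ _ (ih (by omega))

-- ===== VERDICT (by name: the statement is the Claim_ definition above) =====
theorem maxOnes_spec : Claim_equal_maxOnes := by
  intro arr k _
  unfold Spec_maxOnes maxOnes maxOnes_alt
  obtain ⟨Ln, ln, hA1, hB1, hLl, hlm, hA2, hB2, hvalid, hmin, hbest⟩ :=
    pvInv_fold arr k arr.length (le_refl _)
  simp only [PySem.List.pyRange_zero_nat, List.foldl_map]
  rw [hA1, hbest]
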